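-- pv_equiv track=rewrite | github.com/blopax/expert_system | old/expert_system.py | check_if_comment
-- ===== SOURCE A (Python) =====
-- def check_if_comment(line, i):
--     j = 0
--     while j < len(line) and line[j] != '#':
--         if line[j] == ' ' or line[j] == '\t':
--             pass
--         else:
--             return False
--         j += 1
--     return True
-- ===== SOURCE B (Python) =====
-- def check_if_comment(line, i):
--     prefix = line.split('#', 1)[0]
--     return prefix.strip(' \t') == ''
-- ===== Notes on version B (the rewrite author's own statement) =====
-- stated objective: idiomatic
-- what changed: Replaces the indexed character-by-character while-loop with early returns by a two-phase locate-then-validate: split off the text before the first '#' with split('#', 1)[0], then test it in one step with strip(' \t') == ''.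
import Mathlib
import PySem

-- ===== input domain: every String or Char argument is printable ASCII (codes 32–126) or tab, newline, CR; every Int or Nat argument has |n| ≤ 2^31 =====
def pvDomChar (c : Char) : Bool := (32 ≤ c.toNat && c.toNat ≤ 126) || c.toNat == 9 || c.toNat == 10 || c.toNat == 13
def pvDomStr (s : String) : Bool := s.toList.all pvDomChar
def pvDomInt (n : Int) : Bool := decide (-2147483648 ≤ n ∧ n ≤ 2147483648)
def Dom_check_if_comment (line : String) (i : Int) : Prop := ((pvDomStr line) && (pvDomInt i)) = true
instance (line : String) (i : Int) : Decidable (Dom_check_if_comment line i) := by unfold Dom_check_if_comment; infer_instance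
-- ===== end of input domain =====

-- B replaces A's indexed while-loop with early returns by locate-then-validate:
-- split the text before the first '#' (split('#',1)[0]), then check it with strip(' \t') == ''.


-- ===== PORT A =====
-- the while-loop over j: at each position, stop with True on '#', continue on ' '/'\t', else return False
def checkLoopA : List Char → Bool
  | [] => true
  | c :: rest =>
    if c = '#' then true
    else if c = ' ' ∨ c = '\t' then checkLoopA rest
    else false

def check_if_comment (line : String) (i : Int) : Bool := checkLoopA line.toList

-- ===== PORT B =====
-- line.split('#', 1)[0] : split always returns a nonempty list, so [0] is headD
def check_if_comment_alt (line : String) (i : Int) : Bool :=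
  let pre := ((PySem.Chars.splitMax? line.toList ['#'] 1).getD []).headD []
  decide (PySem.Chars.stripChars pre [' ', '\t'] = [])

-- ===== PRECONDITION & SPEC =====
def Spec_check_if_comment (line : String) (i : Int) (out : Bool) : Prop := out = check_if_comment_alt line i
instance (line : String) (i : Int) (out : Bool) : Decidable (Spec_check_if_comment line i out) := by unfold Spec_check_if_comment; infer_instance

-- ===== CLAIM (what is proved, stated in full; the proofs are below) =====
def Claim_equal_check_if_comment : Prop := ∀ (line : String) (i : Int), Dom_check_if_comment line i → Spec_check_if_comment line i (check_if_comment line i)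

-- ===== LEMMAS AND PROOFS =====

-- A's loop answers: every char before the first '#' is ' ' or '\t'
theorem checkLoopA_eq_all (s : List Char) :
    checkLoopA s = (s.takeWhile (· ≠ '#')).all (fun c => c = ' ' || c = '\t') := by
  induction s with
  | nil => rfl
  | cons c rest ih =>
    by_cases hc : c = '#'
    · simp [checkLoopA, hc, List.takeWhile]
    · by_cases hs : c = ' ' ∨ c = '\t'
      · simp only [checkLoopA, if_neg hc, if_pos hs, List.takeWhile]
        simp only [ne_eq, hc, not_false_eq_true, decide_true, List.all_cons, ih]
        rcases hs with h | h <;> simp [h]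
      · rw [not_or] at hs
        simp [checkLoopA, hc, hs.1, hs.2, List.takeWhile]

-- the first piece of splitOnMax.go with sep = ['#'] and maxsplit 1
theorem go_first (s : List Char) : ∀ (fuel : Nat) (cur : List Char), s.length ≤ fuel →
    (PySem.Chars.splitOnMax.go ['#'] fuel 1 s cur []).headD [] =
      cur.reverse ++ s.takeWhile (· ≠ '#') := by
  induction s with
  | nil =>
    intro fuel cur _
    cases fuel <;> simp [PySem.Chars.splitOnMax.go, List.takeWhile]
  | cons c rest ih =>
    intro fuel cur hf
    cases fuel with
    | zero => simp at hf
    | succ fuel' =>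
      by_cases hc : c = '#'
      · subst hc
        simp [PySem.Chars.splitOnMax.go, List.isPrefixOf, List.takeWhile]
        cases fuel' <;> cases rest <;> simp [PySem.Chars.splitOnMax.go]
      · have hpre : (['#'].isPrefixOf (c :: rest)) = false := by
          simp only [List.isPrefixOf, Bool.and_eq_false_iff,
            beq_eq_false_iff_ne, ne_eq]
          exact Or.inl fun h => hc h.symm
        simp only [PySem.Chars.splitOnMax.go, hpre, if_neg (by decide : ¬ (1 = 0)),
          Bool.false_eq_true, if_false]
        rw [ih fuel' (c :: cur) (by simpa using Nat.lt_succ_iff.mp (by simpa using hf))]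
        simp [List.takeWhile, hc]

-- stripChars strips to empty exactly when every char is in the strip set
theorem stripChars_eq_nil_iff (s chars : List Char) :
    PySem.Chars.stripChars s chars = [] ↔ ∀ c ∈ s, chars.contains c := by
  simp only [PySem.Chars.stripChars, List.reverse_eq_nil_iff, List.dropWhile_eq_nil_iff,
    List.mem_reverse]
  constructor
  · intro h c hc
    by_cases hmem : c ∈ List.dropWhile (fun c => chars.contains c) s
    · exact h c hmem
    · -- c was dropped, so chars.contains c
      by_contra hnc
      have := List.dropWhile_sublist (p := fun c => chars.contains c) (l := s)
      -- first element of dropWhile fails p; if dropWhile misses c then c was in the dropped prefix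
      have hsplit := List.takeWhile_append_dropWhile (p := fun c => chars.contains c) (l := s)
      rw [← hsplit] at hc
      rcases List.mem_append.mp hc with h1 | h1
      · exact hnc (List.mem_takeWhile_imp h1)
      · exact hmem h1
  · intro h c hc
    exact h c ((List.dropWhile_sublist _).subset hc)

-- ===== VERDICT (by name: the statement is the Claim_ definition above) =====
theorem check_if_comment_spec : Claim_equal_check_if_comment := by
  intro line i _
  show check_if_comment line i = check_if_comment_alt line i
  unfold check_if_comment check_if_comment_alt
  rw [checkLoopA_eq_all]
  simp only [PySem.Chars.splitMax?, PySem.Chars.splitOnMax, List.isEmpty_cons, Int.toNat_one,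
    if_neg (by decide : ¬ (1 : Int) < 0), Bool.false_eq_true, if_false, Option.getD_some]
  rw [go_first line.toList (line.toList.length + 1) [] (by omega)]
  simp only [List.reverse_nil, List.nil_append]
  rw [Bool.eq_iff_iff, List.all_eq_true, decide_eq_true_iff, stripChars_eq_nil_iff]
  constructor <;> intro h c hc <;> have := h c hc <;>
    simp only [List.contains_cons, List.contains_nil, Bool.or_false,
      Bool.or_eq_true, beq_iff_eq, decide_eq_true_eq] at this ⊢ <;> tauto
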